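-- pv_equiv track=rewrite | github.com/54data/Algorithm_Study | 프로그래머스/unrated/154540. 무인도 여행/무인도 여행.py | solution
-- ===== SOURCE A (Python) =====
-- from collections import deque
--
-- def solution(maps):
--     answer = []
--     visited = [[False for _ in range(len(maps[0]))] for _ in range(len(maps))]
--     direction = [(1,0),(-1,0),(0,-1),(0,1)]
--
--     for i in range(len(maps)):
--         for j in range(len(maps[0])):
--             if not visited[i][j] and maps[i][j] != 'X':
--                 visited[i][j] = True
--                 queue = deque([(i, j)])
--                 num = int(maps[i][j])
--
--                 while queue:
--                     x, y = queue.popleft()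
--                     for dx, dy in direction:
--                         nx, ny = x + dx, y + dy
--                         if 0 <= nx < len(maps) and 0 <= ny < len(maps[0]) and not visited[nx][ny]:
--                             if maps[nx][ny] != 'X':
--                                 num += int(maps[nx][ny])
--                                 visited[nx][ny] = True
--                                 queue.append((nx,ny))
--                 answer.append(num)
--
--     if answer:
--         answer.sort()
--     else:
--         answer.append(-1)
--
--     return answer
-- ===== SOURCE B (Python) =====
-- def solution(maps):
--     h, w = len(maps), len(maps[0])
--
--     # initial labels: each non-'X' cell starts labelled with its own flat index, 'X' cells get None
--     labels = []
--     for i in range(h):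
--         for j in range(w):
--             labels.append(None if maps[i][j] == 'X' else i * w + j)
--
--     def relax(L):
--         out = []
--         for i in range(h):
--             for j in range(w):
--                 cur = L[i * w + j]
--                 if cur is None:
--                     out.append(None)
--                     continue
--                 best = cur
--                 for ni, nj in ((i - 1, j), (i + 1, j), (i, j - 1), (i, j + 1)):
--                     if 0 <= ni < h and 0 <= nj < w:
--                         m = L[ni * w + nj]
--                         if m is not None and m < best:
--                             best = m
--                 out.append(best)
--         return out
--
--     # propagate the minimum label through each connected region until nothing changes
--     while True:
--         new = relax(labels)
--         if new == labels:
--             break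
--         labels = new
--
--     # group the cell values by final label (insertion order = scan order of each region's first cell)
--     sums = {}
--     for i in range(h):
--         for j in range(w):
--             lab = labels[i * w + j]
--             if lab is not None:
--                 sums[lab] = sums.get(lab, 0) + int(maps[i][j])
--
--     vals = list(sums.values())
--     return sorted(vals) if vals else [-1]
-- ===== Notes on version B (the rewrite author's own statement) =====
-- stated objective: alternative
-- what changed: Replaces A's per-seed BFS flood fill (deque + visited matrix) with a queue-free minimum-label relaxation: every non-'X' cell starts labelled with its own index, labels are relaxed to the neighbourhood minimum until a fixpoint, and one final pass groups cell values by label in a dict.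
-- outside the precondition, e.g. on solution([]): A returns [-1], B raises IndexError
import Mathlib
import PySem

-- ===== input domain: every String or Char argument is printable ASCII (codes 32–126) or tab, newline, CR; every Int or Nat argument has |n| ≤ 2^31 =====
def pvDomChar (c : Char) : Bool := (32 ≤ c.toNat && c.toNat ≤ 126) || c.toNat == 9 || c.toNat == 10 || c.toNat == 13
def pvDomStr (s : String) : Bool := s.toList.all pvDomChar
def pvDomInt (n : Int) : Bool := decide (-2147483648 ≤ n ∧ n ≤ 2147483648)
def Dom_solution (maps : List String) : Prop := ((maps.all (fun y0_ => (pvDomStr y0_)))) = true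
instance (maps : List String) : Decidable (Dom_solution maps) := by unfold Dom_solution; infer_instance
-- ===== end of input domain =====

-- ===== PORT A =====
-- int(maps[i][j]) for the single character there (Pre_ guarantees a digit)
def digitVal (c : Char) : Int := (PySem.Int.ofStr? (String.ofList [c])).getD 0
-- maps[i][j] (Pre_ guarantees both indices in range)
def charAt (maps : List String) (i j : Nat) : Char := ((maps.getD i "").toList).getD j 'X'
-- len(maps[0]) (Pre_ guarantees maps ≠ [])
def Wof (maps : List String) : Nat := ((maps.getD 0 "").toList).length

def vget (v : List (List Bool)) (i j : Nat) : Bool := (v.getD i []).getD j false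
def vset (v : List (List Bool)) (i j : Nat) : List (List Bool) :=
  v.set i ((v.getD i []).set j true)
def falseCount (v : List (List Bool)) : Nat :=
  (v.map (fun r => r.countP (fun b => !b))).sum

lemma countP_false_set : ∀ (r : List Bool) (j : Nat), j < r.length → r.getD j false = false →
    (r.set j true).countP (fun b => !b) + 1 = r.countP (fun b => !b) := by
  intro r
  induction r with
  | nil => intro j h; simp at h
  | cons b t ih =>
    intro j hj hf
    cases j with
    | zero => simp_all
    | succ k =>
      simp only [List.length_cons, Nat.succ_lt_succ_iff] at hj
      simp only [List.getD_cons_succ] at hf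
      simp only [List.set_cons_succ, List.countP_cons]
      have := ih k hj hf
      omega

lemma falseCount_vset : ∀ (v : List (List Bool)) (i j : Nat), i < v.length →
    j < (v.getD i []).length → vget v i j = false →
    falseCount (vset v i j) + 1 = falseCount v := by
  intro v
  induction v with
  | nil => intro i j h; simp at h
  | cons r t ih =>
    intro i j hi hj hf
    cases i with
    | zero =>
      simp only [List.getD_cons_zero] at hj
      simp only [vget, List.getD_cons_zero] at hf
      simp only [vset, falseCount, List.getD_cons_zero, List.set_cons_zero, List.map_cons,
        List.sum_cons]
      have := countP_false_set r j hj hf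
      omega
    | succ k =>
      simp only [List.length_cons, Nat.succ_lt_succ_iff] at hi
      simp only [List.getD_cons_succ] at hj
      simp only [vget, List.getD_cons_succ] at hf
      simp only [vset, falseCount, List.getD_cons_succ, List.set_cons_succ, List.map_cons,
        List.sum_cons]
      have := ih k j hi hj hf
      simp only [vset, falseCount] at this
      omega

def directions : List (Int × Int) := [(1,0),(-1,0),(0,-1),(0,1)]

def tryDir (maps : List String) (x y : Int)
    (st : List (List Bool) × List (Int × Int) × Int) (d : Int × Int) :
    List (List Bool) × List (Int × Int) × Int :=
  let nx := x + d.1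
  let ny := y + d.2
  -- bounds are also checked against the visited array (it always has exactly len(maps) × len(maps[0])
  -- entries at every call, so this is the same test) to keep the recursion well-founded
  if 0 ≤ nx ∧ nx < (maps.length : Int) ∧ 0 ≤ ny ∧ ny < (Wof maps : Int)
      ∧ nx.toNat < st.1.length ∧ ny.toNat < (st.1.getD nx.toNat []).length
      ∧ vget st.1 nx.toNat ny.toNat = false then
    if charAt maps nx.toNat ny.toNat ≠ 'X' then
      (vset st.1 nx.toNat ny.toNat, st.2.1 ++ [(nx, ny)],
        st.2.2 + digitVal (charAt maps nx.toNat ny.toNat))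
    else st
  else st

lemma tryDir_measure (maps : List String) (x y : Int)
    (st : List (List Bool) × List (Int × Int) × Int) (d : Int × Int) :
    5 * falseCount (tryDir maps x y st d).1 + (tryDir maps x y st d).2.1.length ≤
      5 * falseCount st.1 + st.2.1.length := by
  unfold tryDir
  dsimp only
  split_ifs with h1 h2
  · obtain ⟨-, -, -, -, h5, h6, h7⟩ := h1
    have := falseCount_vset st.1 _ _ h5 h6 h7
    simp only [List.length_append, List.length_cons, List.length_nil]
    omega
  · exact le_refl _
  · exact le_refl _

lemma foldl_tryDir_measure (maps : List String) (x y : Int) :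
    ∀ (l : List (Int × Int)) (st : List (List Bool) × List (Int × Int) × Int),
      5 * falseCount (l.foldl (tryDir maps x y) st).1 + (l.foldl (tryDir maps x y) st).2.1.length ≤
        5 * falseCount st.1 + st.2.1.length := by
  intro l
  induction l with
  | nil => intro st; exact le_refl _
  | cons d t ih =>
    intro st
    calc 5 * falseCount ((d :: t).foldl (tryDir maps x y) st).1 +
          ((d :: t).foldl (tryDir maps x y) st).2.1.length
        = 5 * falseCount (t.foldl (tryDir maps x y) (tryDir maps x y st d)).1 +
          (t.foldl (tryDir maps x y) (tryDir maps x y st d)).2.1.length := by simp [List.foldl]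
      _ ≤ 5 * falseCount (tryDir maps x y st d).1 + (tryDir maps x y st d).2.1.length := ih _
      _ ≤ 5 * falseCount st.1 + st.2.1.length := tryDir_measure maps x y st d

def bfs (maps : List String) (v : List (List Bool)) (q : List (Int × Int)) (num : Int) :
    List (List Bool) × Int :=
  match q with
  | [] => (v, num)
  | c :: rest =>
    bfs maps (directions.foldl (tryDir maps c.1 c.2) (v, rest, num)).1
      (directions.foldl (tryDir maps c.1 c.2) (v, rest, num)).2.1
      (directions.foldl (tryDir maps c.1 c.2) (v, rest, num)).2.2
termination_by 5 * falseCount v + q.length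
decreasing_by
  have h := foldl_tryDir_measure maps c.1 c.2 directions (v, rest, num)
  dsimp only at h
  simp only [List.length_cons]
  omega

def scanCell (maps : List String) (st : List (List Bool) × List Int) (i j : Nat) :
    List (List Bool) × List Int :=
  if vget st.1 i j = false ∧ charAt maps i j ≠ 'X' then
    let r := bfs maps (vset st.1 i j) [((i : Int), (j : Int))] (digitVal (charAt maps i j))
    (r.1, st.2 ++ [r.2])
  else st

def solution (maps : List String) : List Int :=
  let h := maps.length
  let w := Wof maps
  let r := (List.range h).foldl
      (fun st i => (List.range w).foldl (fun st j => scanCell maps st i j) st)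
      (List.replicate h (List.replicate w false), ([] : List Int))
  if r.2 = [] then [-1] else PySem.List.sorted r.2 (fun x => x) false

-- ===== PORT B =====
-- one 'out.append(…)' double loop of Source B (used for the initial labels and for each relaxation pass)
def grid2 {α : Type} (h w : Nat) (f : Nat → Nat → α) : List α :=
  (List.range h).foldl (fun acc i =>
    (List.range w).foldl (fun acc j => acc ++ [f i j]) acc) []

-- body of Source B's inner neighbour loop: one candidate neighbour p folded into the running minimum
def nstep (h w : Nat) (L : List (Option Nat)) (best : Nat) (p : Int × Int) : Nat :=
  if 0 ≤ p.1 ∧ p.1 < (h:Int) ∧ 0 ≤ p.2 ∧ p.2 < (w:Int) then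
    match L.getD (p.1.toNat * w + p.2.toNat) none with
    | none => best
    | some m => if m < best then m else best
  else best

def newLabel (h w : Nat) (L : List (Option Nat)) (i j : Nat) : Option Nat :=
  match L.getD (i * w + j) none with
  | none => none
  | some cur =>
    some (([((i:Int)-1, (j:Int)), ((i:Int)+1, (j:Int)), ((i:Int), (j:Int)-1),
            ((i:Int), (j:Int)+1)]).foldl (nstep h w L) cur)

def relax (h w : Nat) (L : List (Option Nat)) : List (Option Nat) :=
  grid2 h w (newLabel h w L)

def labelSum (L : List (Option Nat)) : Nat := (L.map (fun o => o.getD 0)).sum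

lemma grid2_eq_flatMap {α : Type} (h w : Nat) (f : Nat → Nat → α) :
    grid2 h w f = (List.range h).flatMap (fun i => (List.range w).map (f i)) := by
  unfold grid2
  have inner : ∀ (i : Nat) (acc : List α),
      (List.range w).foldl (fun acc j => acc ++ [f i j]) acc = acc ++ (List.range w).map (f i) :=
    fun i acc => PySem.List.foldl_append_singleton_eq_map (f := f i) (l := List.range w) (acc := acc)
  calc (List.range h).foldl (fun acc i => (List.range w).foldl (fun acc j => acc ++ [f i j]) acc) []
      = (List.range h).foldl (fun acc i => acc ++ (List.range w).map (f i)) [] := by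
        exact PySem.List.foldl_congr_mem _ _ _ _ (fun acc i _ => inner i acc)
    _ = [] ++ (List.range h).flatMap (fun i => (List.range w).map (f i)) :=
        PySem.List.foldl_append_eq_flatMap _ _ _
    _ = _ := by simp

lemma grid2_length {α : Type} (h w : Nat) (f : Nat → Nat → α) : (grid2 h w f).length = h * w := by
  rw [grid2_eq_flatMap]
  induction h with
  | zero => simp
  | succ n ih =>
    rw [List.range_succ, List.flatMap_append]
    simp only [List.length_append, ih, List.flatMap_cons, List.flatMap_nil, List.append_nil,
      List.length_map, List.length_range]
    ring

lemma grid2_getElem? {α : Type} (h w : Nat) (f : Nat → Nat → α) (i j : Nat)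
    (hi : i < h) (hj : j < w) : (grid2 h w f)[i * w + j]? = some (f i j) := by
  rw [grid2_eq_flatMap]
  induction h with
  | zero => omega
  | succ n ih =>
    rw [List.range_succ, List.flatMap_append]
    by_cases hin : i < n
    · rw [List.getElem?_append_left]
      · exact ih hin
      · have := grid2_length n w f
        rw [grid2_eq_flatMap] at this
        rw [this]
        calc i * w + j < i * w + w := by omega
          _ ≤ n * w := by nlinarith
    · have hieq : i = n := by omega
      subst hieq
      have hlen : ((List.range i).flatMap fun i => (List.range w).map (f i)).length = i * w := by
        have := grid2_length i w f
        rwa [grid2_eq_flatMap] at this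
      rw [List.getElem?_append_right (by omega)]
      rw [hlen]
      simp only [List.flatMap_cons, List.flatMap_nil, List.append_nil]
      have : i * w + j - i * w = j := by omega
      rw [this]
      simp [List.getElem?_map, List.getElem?_range hj]

lemma grid2_getD {α : Type} (h w : Nat) (f : Nat → Nat → Option α) (i j : Nat)
    (hi : i < h) (hj : j < w) : (grid2 h w f).getD (i * w + j) none = f i j := by
  rw [List.getD_eq_getElem?_getD, grid2_getElem? h w f i j hi hj]
  rfl

lemma foldl_le_init {α : Type} (f : Nat → α → Nat) (hf : ∀ b x, f b x ≤ b) :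
    ∀ (l : List α) (b : Nat), l.foldl f b ≤ b := by
  intro l
  induction l with
  | nil => intro b; exact le_refl _
  | cons x t ih => intro b; exact le_trans (ih (f b x)) (hf b x)

lemma newLabel_cases (h w : Nat) (L : List (Option Nat)) (i j : Nat) :
    (L.getD (i * w + j) none = none → newLabel h w L i j = none) ∧
    (∀ cur, L.getD (i * w + j) none = some cur →
      ∃ v, newLabel h w L i j = some v ∧ v ≤ cur) := by
  constructor
  · intro hnone; simp only [newLabel, hnone]
  · intro cur hcur
    simp only [newLabel, hcur]
    refine ⟨_, rfl, ?_⟩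
    apply foldl_le_init
    intro b p
    unfold nstep
    split_ifs with hb
    · cases hL : L.getD (p.1.toNat * w + p.2.toNat) none with
      | none => simp
      | some m => dsimp only; split_ifs with hm <;> omega
    · exact le_refl _

lemma labelSum_le_of_pointwise :
    ∀ (L L' : List (Option Nat)),
      (∀ k, ((L'.getD k none).getD 0 : Nat) ≤ (L.getD k none).getD 0) →
      labelSum L' ≤ labelSum L := by
  intro L
  induction L with
  | nil =>
    intro L' hpt
    cases L' with
    | nil => exact le_refl _
    | cons b t' =>
      have hz : labelSum (b :: t') = 0 := by
        apply List.sum_eq_zero_iff_forall_eq_nat.mpr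
        intro x hx
        obtain ⟨o, ho, rfl⟩ := List.mem_map.1 hx
        obtain ⟨k, hk, rfl⟩ := List.mem_iff_getElem.1 ho
        have := hpt k
        simp only [List.getD_eq_getElem (b :: t') none hk] at this
        simpa using this
      simpa [labelSum] using le_of_eq hz
  | cons a t ih =>
    intro L' hpt
    cases L' with
    | nil => simp [labelSum]
    | cons b t' =>
      have h0 := hpt 0
      simp only [List.getD_cons_zero] at h0
      have ht := ih t' (fun k => by simpa using hpt (k + 1))
      simp only [labelSum, List.map_cons, List.sum_cons]
      have := ht
      simp only [labelSum] at this
      omega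

lemma getD_le_labelSum : ∀ (L : List (Option Nat)) (k : Nat),
    ((L.getD k none).getD 0 : Nat) ≤ labelSum L := by
  intro L
  induction L with
  | nil => intro k; simp [labelSum]
  | cons a t ih =>
    intro k
    cases k with
    | zero => simp [labelSum]
    | succ n =>
      have := ih n
      simp only [List.getD_cons_succ, labelSum, List.map_cons, List.sum_cons] at *
      omega

lemma labelSum_lt_of_pointwise :
    ∀ (L L' : List (Option Nat)),
      (∀ k, ((L'.getD k none).getD 0 : Nat) ≤ (L.getD k none).getD 0) →
      ∀ k0, ((L'.getD k0 none).getD 0 : Nat) < (L.getD k0 none).getD 0 →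
      labelSum L' < labelSum L := by
  intro L
  induction L with
  | nil =>
    intro L' hpt k0 hk0
    simp at hk0
  | cons a t ih =>
    intro L' hpt k0 hk0
    cases L' with
    | nil =>
      have hpos := getD_le_labelSum (a :: t) k0
      simp only [List.getD_nil, Option.getD_none] at hk0
      simp only [labelSum, List.map_nil, List.sum_nil] at hpos ⊢
      omega
    | cons b t' =>
      have hle := labelSum_le_of_pointwise t t' (fun k => by simpa using hpt (k + 1))
      simp only [labelSum, List.map_cons, List.sum_cons]
      simp only [labelSum] at hle
      cases k0 with
      | zero =>
        simp only [List.getD_cons_zero] at hk0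
        omega
      | succ k =>
        have h0 := hpt 0
        simp only [List.getD_cons_zero] at h0
        simp only [List.getD_cons_succ] at hk0
        have := ih t' (fun k => by simpa using hpt (k + 1)) k hk0
        simp only [labelSum] at this
        omega

lemma relax_pointwise (h w : Nat) (L : List (Option Nat)) (_hL : L.length = h * w)
    (k : Nat) (hk : k < h * w) :
    (L.getD k none = none ∧ (relax h w L).getD k none = none) ∨
    (∃ a b, L.getD k none = some a ∧ (relax h w L).getD k none = some b ∧ b ≤ a) := by
  have hw : 0 < w := by
    rcases Nat.eq_zero_or_pos w with h0 | h0
    · exfalso; rw [h0, Nat.mul_zero] at hk; omega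
    · exact h0
  have hij : (k / w) * w + k % w = k := by
    rw [Nat.mul_comm]
    exact Nat.div_add_mod k w
  have hiw : k / w < h := Nat.div_lt_of_lt_mul (by rw [Nat.mul_comm] at hk; exact hk)
  have hjw : k % w < w := Nat.mod_lt _ hw
  have hrel : (relax h w L).getD k none = newLabel h w L (k / w) (k % w) := by
    conv_lhs => rw [← hij]
    exact grid2_getD h w _ _ _ hiw hjw
  obtain ⟨hn, hs⟩ := newLabel_cases h w L (k / w) (k % w)
  rw [hij] at hn hs
  cases hc : L.getD k none with
  | none => exact Or.inl ⟨rfl, by rw [hrel, ← hij] at *; exact hn hc⟩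
  | some cur =>
    obtain ⟨v, hv, hvle⟩ := hs cur hc
    exact Or.inr ⟨cur, v, rfl, by rw [hrel, ← hij] at *; exact hv, hvle⟩

lemma relax_labelSum_lt (h w : Nat) (L : List (Option Nat)) (hL : L.length = h * w)
    (hne : relax h w L ≠ L) : labelSum (relax h w L) < labelSum L := by
  have hlen : (relax h w L).length = L.length := by rw [relax, grid2_length, hL]
  have hpt : ∀ k, (((relax h w L).getD k none).getD 0 : Nat) ≤ (L.getD k none).getD 0 := by
    intro k
    by_cases hk : k < h * w
    · rcases relax_pointwise h w L hL k hk with ⟨h1, h2⟩ | ⟨a, b, h1, h2, h3⟩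
      · rw [h1, h2]
      · rw [h1, h2]; simpa using h3
    · rw [List.getD_eq_default _ _ (by omega), List.getD_eq_default _ _ (by omega)]
  have hex : ∃ k, k < L.length ∧ (relax h w L).getD k none ≠ L.getD k none := by
    by_contra hall
    push_neg at hall
    apply hne
    apply List.ext_getElem hlen
    intro k hk1 hk2
    have := hall k (by omega)
    rwa [List.getD_eq_getElem _ none hk1, List.getD_eq_getElem _ none hk2] at this
  obtain ⟨k, hk, hdiff⟩ := hex
  rcases relax_pointwise h w L hL k (by omega) with ⟨h1, h2⟩ | ⟨a, b, h1, h2, h3⟩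
  · rw [h1, h2] at hdiff; exact absurd rfl hdiff
  · have hba : b < a := by
      rcases Nat.lt_or_ge b a with hlt | hge
      · exact hlt
      · exfalso; apply hdiff; rw [h1, h2]; congr 1; omega
    exact labelSum_lt_of_pointwise L _ hpt k (by rw [h1, h2]; simpa using hba)

def propagate (h w : Nat) (L : List (Option Nat)) (hL : L.length = h * w) :
    List (Option Nat) :=
  if hfix : relax h w L = L then L
  else propagate h w (relax h w L) (by rw [relax, grid2_length])
termination_by labelSum L
decreasing_by exact relax_labelSum_lt h w L hL hfix

-- body of Source B's final grouping loop: one cell (i, j) folded into the sums dict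
def sumStep (maps : List String) (L : List (Option Nat)) (w : Nat)
    (d : PySem.Dict Nat Int) (i j : Nat) : PySem.Dict Nat Int :=
  match L.getD (i * w + j) none with
  | none => d
  | some lab => d.insert lab (d.getD lab 0 + digitVal (charAt maps i j))

def solution_alt (maps : List String) : List Int :=
  let h := maps.length
  let w := Wof maps
  let L := propagate h w
    (grid2 h w (fun i j => if charAt maps i j = 'X' then none else some (i * w + j)))
    (grid2_length h w _)
  let sums := (List.range h).foldl (fun d i =>
      (List.range w).foldl (fun d j => sumStep maps L w d i j) d)
    (PySem.Dict.empty : PySem.Dict Nat Int)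
  let vals := sums.values
  if vals = [] then [-1] else PySem.List.sorted vals (fun x => x) false


-- ===== PRECONDITION & SPEC =====
-- Pre_: the inputs where Python A returns and its value is the claimed one: every row has at least
-- len(maps[0]) characters (maps[i][j] is read for every j < len(maps[0])) and every scanned character
-- is 'X' or a decimal digit (otherwise int() raises ValueError); maps = [] is excluded because A's
-- [-1] there is an accident of comprehension laziness (len(maps[0]) is never evaluated) while B, which
-- reads len(maps[0]) up front, raises IndexError on it.
def Pre_solution (maps : List String) : Prop :=
  maps ≠ [] ∧ (∀ s ∈ maps, Wof maps ≤ s.toList.length) ∧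
    ∀ i < maps.length, ∀ j < Wof maps,
      charAt maps i j = 'X' ∨ ('0' ≤ charAt maps i j ∧ charAt maps i j ≤ '9')
instance (maps : List String) : Decidable (Pre_solution maps) := by
  unfold Pre_solution; infer_instance
def pvWitness_solution : List String := (["X9", "34"])
def Spec_solution (maps : List String) (out : List Int) : Prop := out = solution_alt maps
instance (maps : List String) (out : List Int) : Decidable (Spec_solution maps out) := by
  unfold Spec_solution; infer_instance

-- ===== CLAIM (what is proved, stated in full; the proofs are below) =====
def Claim_equal_solution : Prop := ∀ (maps : List String), Dom_solution maps → Pre_solution maps → Spec_solution maps (solution maps)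

-- ===== LEMMAS AND PROOFS =====


-- ---------- abstract grid-graph layer (proof-only) ----------

def land (maps : List String) (c : Nat × Nat) : Prop :=
  c.1 < maps.length ∧ c.2 < Wof maps ∧ charAt maps c.1 c.2 ≠ 'X'

def adjc (maps : List String) (c d : Nat × Nat) : Prop :=
  land maps c ∧ land maps d ∧
    ((c.1 = d.1 ∧ (c.2 + 1 = d.2 ∨ d.2 + 1 = c.2)) ∨
     (c.2 = d.2 ∧ (c.1 + 1 = d.1 ∨ d.1 + 1 = c.1)))

def Conn (maps : List String) (c d : Nat × Nat) : Prop :=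
  land maps c ∧ Relation.ReflTransGen (adjc maps) c d

lemma adjc_symm (maps : List String) {c d : Nat × Nat} (h : adjc maps c d) : adjc maps d c := by
  obtain ⟨h1, h2, h3⟩ := h
  exact ⟨h2, h1, by tauto⟩

lemma land_of_conn (maps : List String) {c d : Nat × Nat} (h : Conn maps c d) : land maps d := by
  obtain ⟨hc, hr⟩ := h
  induction hr with
  | refl => exact hc
  | tail _ hstep ih => exact hstep.2.1

lemma conn_refl (maps : List String) {c : Nat × Nat} (h : land maps c) : Conn maps c c :=
  ⟨h, Relation.ReflTransGen.refl⟩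

lemma conn_trans (maps : List String) {c d e : Nat × Nat}
    (h1 : Conn maps c d) (h2 : Conn maps d e) : Conn maps c e :=
  ⟨h1.1, h1.2.trans h2.2⟩

lemma conn_symm (maps : List String) {c d : Nat × Nat} (h : Conn maps c d) : Conn maps d c :=
  ⟨land_of_conn maps h,
   Relation.ReflTransGen.symmetric (fun _ _ hab => adjc_symm maps hab) h.2⟩

lemma conn_tail (maps : List String) {c d e : Nat × Nat}
    (h1 : Conn maps c d) (h2 : adjc maps d e) : Conn maps c e :=
  ⟨h1.1, h1.2.tail h2⟩

def idxm (maps : List String) (c : Nat × Nat) : Nat := c.1 * Wof maps + c.2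

lemma idxm_inj (maps : List String) {a b : Nat × Nat} (ha2 : a.2 < Wof maps)
    (hb2 : b.2 < Wof maps) (h : idxm maps a = idxm maps b) : a = b := by
  unfold idxm at h
  have h1 : a.1 = b.1 := by
    rcases Nat.lt_trichotomy a.1 b.1 with hlt | heq | hgt
    · exfalso; have := Nat.mul_le_mul_right (Wof maps) hlt; nlinarith
    · exact heq
    · exfalso; have := Nat.mul_le_mul_right (Wof maps) hgt; nlinarith
  have h2 : a.2 = b.2 := by rw [h1] at h; omega
  exact Prod.ext h1 h2

def cellsG (h w : Nat) : List (Nat × Nat) :=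
  (List.range h).flatMap (fun i => (List.range w).map (fun j => (i, j)))

def cells (maps : List String) : List (Nat × Nat) := cellsG maps.length (Wof maps)

lemma mem_cellsG {h w : Nat} {c : Nat × Nat} : c ∈ cellsG h w ↔ c.1 < h ∧ c.2 < w := by
  cases c with
  | mk i j => simp [cellsG, List.mem_flatMap, List.mem_map, List.mem_range, eq_comm]

lemma pairwise_cellsG (h w : Nat) :
    (cellsG h w).Pairwise (fun a b => a.1 * w + a.2 < b.1 * w + b.2) := by
  induction h with
  | zero => simp [cellsG]
  | succ n ih =>
    unfold cellsG at *
    rw [List.range_succ, List.flatMap_append]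
    rw [List.pairwise_append]
    refine ⟨ih, ?_, ?_⟩
    · simp only [List.flatMap_cons, List.flatMap_nil, List.append_nil]
      rw [List.pairwise_map]
      apply List.Pairwise.imp ?_ (List.pairwise_lt_range)
      intro a b hab
      simpa using hab
    · intro a ha b hb
      have ha' : a.1 < n ∧ a.2 < w := mem_cellsG.1 ha
      simp only [List.flatMap_cons, List.flatMap_nil, List.append_nil, List.mem_map,
        List.mem_range] at hb
      obtain ⟨j, hj, rfl⟩ := hb
      simp only
      calc a.1 * w + a.2 < a.1 * w + w := by omega
        _ ≤ n * w := by nlinarith [ha'.1, ha'.2]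
        _ ≤ n * w + j := by omega

lemma nodup_cellsG (h w : Nat) : (cellsG h w).Nodup := by
  apply List.Pairwise.imp ?_ (pairwise_cellsG h w)
  intro a b hab heq
  rw [heq] at hab
  omega

lemma doubleFoldl {β : Type} (h w : Nat) (f : β → Nat → Nat → β) (init : β) :
    (List.range h).foldl (fun st i => (List.range w).foldl (fun st j => f st i j) st) init =
      (cellsG h w).foldl (fun st c => f st c.1 c.2) init := by
  unfold cellsG
  induction h generalizing init with
  | zero => simp
  | succ n ih =>
    rw [List.range_succ, List.flatMap_append, List.foldl_append, List.foldl_append, ih]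
    simp [List.foldl_map]

lemma prefix_char {α : Type} (f : α → Nat) :
    ∀ {l P rest : List α} {t : α}, l.Pairwise (fun a b => f a < f b) → l = P ++ t :: rest →
      ∀ d, d ∈ P ↔ d ∈ l ∧ f d < f t := by
  intro l P rest t hpw heq d
  subst heq
  rw [List.pairwise_append] at hpw
  constructor
  · intro hd
    refine ⟨by simp [hd], ?_⟩
    exact hpw.2.2 d hd t (by simp)
  · rintro ⟨hdl, hlt⟩
    rcases List.mem_append.1 hdl with h | h
    · exact h
    · exfalso
      rcases List.mem_cons.1 h with rfl | h2
      · omega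
      · have := (List.pairwise_cons.1 hpw.2.1).1 d h2
        omega


-- ---------- visited-matrix layer ----------

def Rect (maps : List String) (v : List (List Bool)) : Prop :=
  v.length = maps.length ∧ ∀ r ∈ v, r.length = Wof maps

def Vm (v : List (List Bool)) (c : Nat × Nat) : Prop := vget v c.1 c.2 = true

def val (maps : List String) (c : Nat × Nat) : Int := digitVal (charAt maps c.1 c.2)

lemma vget_eq (v : List (List Bool)) (a b : Nat) :
    vget v a b = ((v[a]?.getD [])[b]?).getD false := by
  simp [vget, List.getD_eq_getElem?_getD]

lemma rect_replicate (maps : List String) :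
    Rect maps (List.replicate maps.length (List.replicate (Wof maps) false)) := by
  constructor
  · simp
  · intro r hr
    rw [List.eq_of_mem_replicate hr]
    simp

lemma vget_replicate (maps : List String) (i j : Nat) :
    vget (List.replicate maps.length (List.replicate (Wof maps) false)) i j = false := by
  rw [vget_eq, List.getElem?_replicate]
  split_ifs with hi
  · simp only [Option.getD_some, List.getElem?_replicate]
    split_ifs with hj <;> simp
  · simp

lemma rect_vset (maps : List String) (v : List (List Bool)) (i j : Nat)
    (hv : Rect maps v) : Rect maps (vset v i j) := by
  obtain ⟨h1, h2⟩ := hv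
  constructor
  · simp [vset, h1]
  · intro r hr
    by_cases hi : i < v.length
    · rcases List.mem_or_eq_of_mem_set hr with h | h
      · exact h2 r h
      · subst h
        rw [List.length_set]
        exact h2 _ (by rw [List.getD_eq_getElem _ _ hi]; exact List.getElem_mem hi)
    · unfold vset at hr
      rw [List.set_eq_of_length_le (by omega)] at hr
      exact h2 r hr

lemma vget_vset (v : List (List Bool)) (i j a b : Nat)
    (hi : i < v.length) (hj : j < (v.getD i []).length) :
    vget (vset v i j) a b = if a = i ∧ b = j then true else vget v a b := by
  rw [List.getD_eq_getElem _ _ hi] at hj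
  rw [vget_eq, vget_eq]
  unfold vset
  by_cases hai : a = i
  · subst hai
    rw [List.getD_eq_getElem _ _ hi, List.getElem?_set_self (by simpa using hi), Option.getD_some]
    by_cases hbj : b = j
    · subst hbj
      rw [List.getElem?_set_self (by simpa using hj)]
      simp
    · simp only [hbj, and_false, if_false]
      rw [List.getElem?_set_ne (by omega), List.getElem?_eq_getElem hi, Option.getD_some]
  · simp only [hai, false_and, if_false]
    rw [List.getElem?_set_ne (by omega)]


-- ---------- BFS invariant (port A) ----------

def BfsInv (maps : List String) (c₀ : Nat × Nat) (V₀ : Nat × Nat → Prop) (base : Int)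
    (ex : Nat × Nat → Prop)
    (v : List (List Bool)) (q : List (Int × Int)) (M : List (Nat × Nat)) (num : Int) : Prop :=
  Rect maps v ∧ M.Nodup ∧ c₀ ∈ M ∧
  (∀ c, Vm v c ↔ V₀ c ∨ c ∈ M) ∧
  (∀ c ∈ M, ¬ V₀ c) ∧
  (∀ c ∈ M, Conn maps c₀ c) ∧
  (∀ p ∈ q, 0 ≤ p.1 ∧ 0 ≤ p.2 ∧ (p.1.toNat, p.2.toNat) ∈ M) ∧
  (∀ c ∈ M, ¬ ex c → c ∉ q.map (fun p : Int × Int => (p.1.toNat, p.2.toNat)) →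
    ∀ b, adjc maps c b → Vm v b) ∧
  num = base + (M.map (val maps)).sum

lemma adjc_dir (maps : List String) (x y : Int) (hx : 0 ≤ x) (hy : 0 ≤ y) (b : Nat × Nat)
    (h : adjc maps (x.toNat, y.toNat) b) :
    ∃ d ∈ directions, (b.1 : Int) = x + d.1 ∧ (b.2 : Int) = y + d.2 := by
  obtain ⟨-, -, hco⟩ := h
  simp only [directions, List.mem_cons]
  rcases hco with ⟨h1, h2 | h2⟩ | ⟨h1, h2 | h2⟩
  · exact ⟨(0, 1), by tauto, by simp; omega, by simp; omega⟩
  · exact ⟨(0, -1), by tauto, by simp; omega, by simp; omega⟩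
  · exact ⟨(1, 0), by tauto, by simp; omega, by simp; omega⟩
  · exact ⟨(-1, 0), by tauto, by simp; omega, by simp; omega⟩

lemma tryDir_step (maps : List String) (c₀ : Nat × Nat) (V₀ : Nat × Nat → Prop) (base : Int)
    (ex : Nat × Nat → Prop) (x y : Int) (hx : 0 ≤ x) (hy : 0 ≤ y)
    (hpop : Conn maps c₀ (x.toNat, y.toNat))
    (st : List (List Bool) × List (Int × Int) × Int) (M : List (Nat × Nat))
    (hInv : BfsInv maps c₀ V₀ base ex st.1 st.2.1 M st.2.2) (d : Int × Int) (hd : d ∈ directions) :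
    ∃ M', M ⊆ M' ∧
      BfsInv maps c₀ V₀ base ex (tryDir maps x y st d).1 (tryDir maps x y st d).2.1 M'
        (tryDir maps x y st d).2.2 ∧
      (∀ c, Vm st.1 c → Vm (tryDir maps x y st d).1 c) ∧
      (∃ ap, (tryDir maps x y st d).2.1 = st.2.1 ++ ap) ∧
      (∀ b, adjc maps (x.toNat, y.toNat) b → (b.1 : Int) = x + d.1 → (b.2 : Int) = y + d.2 →
        Vm (tryDir maps x y st d).1 b) := by
  obtain ⟨hRect, hNd, hc₀M, hVm, hMV₀, hMC, hQ, hCl, hNum⟩ := hInv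
  by_cases hg : 0 ≤ x + d.1 ∧ x + d.1 < (maps.length : Int) ∧ 0 ≤ y + d.2 ∧
      y + d.2 < (Wof maps : Int) ∧ (x + d.1).toNat < st.1.length ∧
      (y + d.2).toNat < (st.1.getD (x + d.1).toNat []).length ∧
      vget st.1 (x + d.1).toNat (y + d.2).toNat = false
  · obtain ⟨hg1, hg2, hg3, hg4, hg5, hg6, hg7⟩ := hg
    by_cases hX : charAt maps (x + d.1).toNat (y + d.2).toNat ≠ 'X'
    · -- the neighbour is new land: it is marked, appended and summed
      have heq : tryDir maps x y st d =
          (vset st.1 (x + d.1).toNat (y + d.2).toNat, st.2.1 ++ [(x + d.1, y + d.2)],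
            st.2.2 + digitVal (charAt maps (x + d.1).toNat (y + d.2).toNat)) := by
        unfold tryDir
        dsimp only
        rw [if_pos ⟨hg1, hg2, hg3, hg4, hg5, hg6, hg7⟩, if_pos hX]
      have hVmset : ∀ a b, vget (vset st.1 (x + d.1).toNat (y + d.2).toNat) a b =
          if a = (x + d.1).toNat ∧ b = (y + d.2).toNat then true else vget st.1 a b :=
        fun a b => vget_vset st.1 _ _ a b hg5 hg6
      have hnVm : ¬ Vm st.1 ((x + d.1).toNat, (y + d.2).toNat) := by simp [Vm, hg7]
      have hnbM : ((x + d.1).toNat, (y + d.2).toNat) ∉ M :=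
        fun hmem => hnVm ((hVm _).2 (Or.inr hmem))
      have hnbV₀ : ¬ V₀ ((x + d.1).toNat, (y + d.2).toNat) :=
        fun hmem => hnVm ((hVm _).2 (Or.inl hmem))
      have hlandpop : land maps (x.toNat, y.toNat) := land_of_conn maps hpop
      have hlandnb : land maps ((x + d.1).toNat, (y + d.2).toNat) := by
        refine ⟨by simp; omega, by simp; omega, by simpa using hX⟩
      have hd' : d = (1, 0) ∨ d = (-1, 0) ∨ d = (0, -1) ∨ d = (0, 1) := by
        simpa [directions] using hd
      have hadj : adjc maps (x.toNat, y.toNat) ((x + d.1).toNat, (y + d.2).toNat) := by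
        refine ⟨hlandpop, hlandnb, ?_⟩
        rcases hd' with rfl | rfl | rfl | rfl <;> simp <;> omega
      have hConnNb : Conn maps c₀ ((x + d.1).toNat, (y + d.2).toNat) := conn_tail maps hpop hadj
      refine ⟨M ++ [((x + d.1).toNat, (y + d.2).toNat)], by simp, ?_, ?_, ?_, ?_⟩
      · rw [heq]
        refine ⟨rect_vset maps _ _ _ hRect, ?_, by simp [hc₀M], ?_, ?_, ?_, ?_, ?_, ?_⟩
        · simp only [List.nodup_append, List.nodup_singleton]
          refine ⟨hNd, trivial, ?_⟩
          intro a ha b hb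
          rw [List.mem_singleton] at hb
          subst hb
          intro hab
          exact hnbM (hab ▸ ha)
        · intro c
          simp only [Vm, hVmset c.1 c.2, List.mem_append, List.mem_singleton]
          split_ifs with hc
          · have hceq : c = ((x + d.1).toNat, (y + d.2).toNat) := Prod.ext hc.1 hc.2
            simp [hceq]
          · rw [show (vget st.1 c.1 c.2 = true ↔ V₀ c ∨ c ∈ M) from hVm c]
            constructor
            · intro h; tauto
            · rintro (h | h | hceq)
              · exact Or.inl h
              · exact Or.inr h
              · exfalso; exact hc ⟨by rw [hceq], by rw [hceq]⟩
        · intro c hc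
          rcases List.mem_append.1 hc with h | h
          · exact hMV₀ c h
          · rw [List.mem_singleton] at h; subst h; exact hnbV₀
        · intro c hc
          rcases List.mem_append.1 hc with h | h
          · exact hMC c h
          · rw [List.mem_singleton] at h; subst h; exact hConnNb
        · intro p hp
          rcases List.mem_append.1 hp with h | h
          · obtain ⟨a1, a2, a3⟩ := hQ p h
            exact ⟨a1, a2, by simp [a3]⟩
          · rw [List.mem_singleton] at h; subst h
            exact ⟨by omega, by omega, by simp⟩
        · intro c hc hex hcq b hb
          rcases List.mem_append.1 hc with h | h
          · have hcq' : c ∉ st.2.1.map (fun p : Int × Int => (p.1.toNat, p.2.toNat)) := by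
              intro hmem
              exact hcq (by simp only [List.map_append, List.mem_append]; exact Or.inl hmem)
            have hold := hCl c h hex hcq' b hb
            simp only [Vm, hVmset b.1 b.2]
            split_ifs with hbnb
            · rfl
            · exact hold
          · exfalso
            rw [List.mem_singleton] at h; subst h
            apply hcq
            simp only [List.map_append, List.mem_append, List.map_cons, List.map_nil,
              List.mem_singleton]
            exact Or.inr (by simp)
        · rw [hNum]
          simp [val, List.sum_append]
          ring
      · intro c hc
        rw [heq]
        simp only [Vm, hVmset c.1 c.2]
        split_ifs with h
        · rfl
        · exact hc
      · rw [heq]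
        exact ⟨[(x + d.1, y + d.2)], rfl⟩
      · intro b hb hb1 hb2
        have hbnb : b = ((x + d.1).toNat, (y + d.2).toNat) := by
          apply Prod.ext <;> omega
        rw [heq]
        simp only [Vm, hVmset b.1 b.2]
        rw [if_pos ⟨by rw [hbnb], by rw [hbnb]⟩]
    · -- the neighbour is 'X': nothing changes, and no adjacent land cell lies in direction d
      have heq : tryDir maps x y st d = st := by
        unfold tryDir
        dsimp only
        rw [if_pos ⟨hg1, hg2, hg3, hg4, hg5, hg6, hg7⟩, if_neg hX]
      refine ⟨M, fun _ hm => hm, by rw [heq]; exact ⟨hRect, hNd, hc₀M, hVm, hMV₀, hMC, hQ, hCl, hNum⟩,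
        by rw [heq]; exact fun c hc => hc, ⟨[], by rw [heq]; simp⟩, ?_⟩
      intro b hb hb1 hb2
      exfalso
      apply hX
      have hbe : b = ((x + d.1).toNat, (y + d.2).toNat) := by
        apply Prod.ext <;> omega
      rw [hbe] at hb
      exact hb.2.1.2.2
  · -- out of bounds or already visited: nothing changes
    have heq : tryDir maps x y st d = st := by
      unfold tryDir
      dsimp only
      rw [if_neg hg]
    refine ⟨M, fun _ hm => hm, by rw [heq]; exact ⟨hRect, hNd, hc₀M, hVm, hMV₀, hMC, hQ, hCl, hNum⟩,
      by rw [heq]; exact fun c hc => hc, ⟨[], by rw [heq]; simp⟩, ?_⟩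
    intro b hb hb1 hb2
    rw [heq]
    -- the guard can only have failed on "already visited": bounds hold because b is a cell
    obtain ⟨-, hlb, -⟩ := hb
    obtain ⟨hb1', hb2', -⟩ := hlb
    have hbl : b.1 < st.1.length := by rw [hRect.1]; exact hb1'
    have hrow : (st.1.getD b.1 []).length = Wof maps :=
      hRect.2 _ (by rw [List.getD_eq_getElem _ _ hbl]; exact List.getElem_mem hbl)
    have e1 : (x + d.1).toNat = b.1 := by omega
    have e2 : (y + d.2).toNat = b.2 := by omega
    have hvis : vget st.1 (x + d.1).toNat (y + d.2).toNat = true := by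
      by_contra hf
      apply hg
      refine ⟨by omega, by omega, by omega, by omega, by rw [e1]; exact hbl,
        by rw [e1, e2, hrow]; exact hb2', by simpa using hf⟩
    rw [e1, e2] at hvis
    exact hvis


lemma dirs_fold_inv (maps : List String) (c₀ : Nat × Nat) (V₀ : Nat × Nat → Prop) (base : Int)
    (ex : Nat × Nat → Prop) (x y : Int) (hx : 0 ≤ x) (hy : 0 ≤ y)
    (hpop : Conn maps c₀ (x.toNat, y.toNat))
    (st : List (List Bool) × List (Int × Int) × Int) (M : List (Nat × Nat))
    (hInv : BfsInv maps c₀ V₀ base ex st.1 st.2.1 M st.2.2) :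
    ∃ M', M ⊆ M' ∧
      BfsInv maps c₀ V₀ base ex (directions.foldl (tryDir maps x y) st).1
        (directions.foldl (tryDir maps x y) st).2.1 M'
        (directions.foldl (tryDir maps x y) st).2.2 ∧
      (∃ ap, (directions.foldl (tryDir maps x y) st).2.1 = st.2.1 ++ ap) ∧
      (∀ b, adjc maps (x.toNat, y.toNat) b → Vm (directions.foldl (tryDir maps x y) st).1 b) := by
  obtain ⟨M1, hs1, hI1, hmono1, hap1, hnb1⟩ :=
    tryDir_step maps c₀ V₀ base ex x y hx hy hpop st M hInv (1, 0) (by simp [directions])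
  obtain ⟨M2, hs2, hI2, hmono2, hap2, hnb2⟩ :=
    tryDir_step maps c₀ V₀ base ex x y hx hy hpop _ M1 hI1 (-1, 0) (by simp [directions])
  obtain ⟨M3, hs3, hI3, hmono3, hap3, hnb3⟩ :=
    tryDir_step maps c₀ V₀ base ex x y hx hy hpop _ M2 hI2 (0, -1) (by simp [directions])
  obtain ⟨M4, hs4, hI4, hmono4, hap4, hnb4⟩ :=
    tryDir_step maps c₀ V₀ base ex x y hx hy hpop _ M3 hI3 (0, 1) (by simp [directions])
  have hfold : directions.foldl (tryDir maps x y) st =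
      tryDir maps x y (tryDir maps x y (tryDir maps x y (tryDir maps x y st (1, 0)) (-1, 0))
        (0, -1)) (0, 1) := by
    simp [directions]
  refine ⟨M4, ?_, by rw [hfold]; exact hI4, ?_, ?_⟩
  · exact fun c hc => hs4 (hs3 (hs2 (hs1 hc)))
  · rw [hfold]
    obtain ⟨a1, e1⟩ := hap1
    obtain ⟨a2, e2⟩ := hap2
    obtain ⟨a3, e3⟩ := hap3
    obtain ⟨a4, e4⟩ := hap4
    exact ⟨a1 ++ a2 ++ a3 ++ a4, by rw [e4, e3, e2, e1]; simp⟩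
  · intro b hb
    rw [hfold]
    obtain ⟨d, hd, hb1, hb2⟩ := adjc_dir maps x y hx hy b hb
    have hd' : d = (1, 0) ∨ d = (-1, 0) ∨ d = (0, -1) ∨ d = (0, 1) := by
      simpa [directions] using hd
    rcases hd' with rfl | rfl | rfl | rfl
    · exact hmono4 _ (hmono3 _ (hmono2 _ (hnb1 b hb hb1 hb2)))
    · exact hmono4 _ (hmono3 _ (hnb2 b hb hb1 hb2))
    · exact hmono4 _ (hnb3 b hb hb1 hb2)
    · exact hnb4 b hb hb1 hb2

lemma bfs_post (maps : List String) (c₀ : Nat × Nat) (V₀ : Nat × Nat → Prop) (base : Int)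
    (hV₀c : ∀ a b, V₀ a → adjc maps a b → V₀ b) :
    ∀ (v : List (List Bool)) (q : List (Int × Int)) (num : Int) (M : List (Nat × Nat)),
      BfsInv maps c₀ V₀ base (fun _ => False) v q M num →
      Rect maps (bfs maps v q num).1 ∧
      (∀ c, Vm (bfs maps v q num).1 c ↔ V₀ c ∨ Conn maps c₀ c) ∧
      ∃ M' : List (Nat × Nat), M'.Nodup ∧ (∀ c, c ∈ M' ↔ Conn maps c₀ c) ∧
        (bfs maps v q num).2 = base + (M'.map (val maps)).sum := by
  intro v q num
  fun_induction bfs maps v q num with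
  | case1 v num =>
    intro M hInv
    obtain ⟨hRect, hNd, hc₀M, hVm, hMV₀, hMC, hQ, hCl, hNum⟩ := hInv
    have hMclosed : ∀ c ∈ M, ∀ b, adjc maps c b → b ∈ M := by
      intro c hc b hb
      have hvm : Vm v b := hCl c hc (fun hf => hf) (by simp) b hb
      rcases (hVm b).1 hvm with h | h
      · exfalso
        exact hMV₀ c hc (hV₀c b c h (adjc_symm maps hb))
      · exact h
    have hconn_mem : ∀ c, Conn maps c₀ c → c ∈ M := by
      intro c hconn
      obtain ⟨hl, hr⟩ := hconn
      induction hr with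
      | refl => exact hc₀M
      | tail hcd hstep ih => exact hMclosed _ ih _ hstep
    refine ⟨hRect, ?_, M, hNd, fun c => ⟨hMC c, hconn_mem c⟩, hNum⟩
    intro c
    rw [show (Vm v c ↔ V₀ c ∨ c ∈ M) from hVm c]
    constructor
    · rintro (h | h)
      · exact Or.inl h
      · exact Or.inr (hMC c h)
    · rintro (h | h)
      · exact Or.inl h
      · exact Or.inr (hconn_mem c h)
  | case2 v num c rest ih =>
    intro M hInv
    obtain ⟨hRect, hNd, hc₀M, hVm, hMV₀, hMC, hQ, hCl, hNum⟩ := hInv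
    obtain ⟨hx, hy, hcM⟩ := hQ c (by simp)
    have hpop : Conn maps c₀ (c.1.toNat, c.2.toNat) := hMC _ hcM
    -- the invariant for the dequeued state, exempting the popped cell from the closure clause
    have hInvRest : BfsInv maps c₀ V₀ base (fun a => a = (c.1.toNat, c.2.toNat))
        (v, rest, num).1 (v, rest, num).2.1 M (v, rest, num).2.2 := by
      refine ⟨hRect, hNd, hc₀M, hVm, hMV₀, hMC, fun p hp => hQ p (by simp [hp]), ?_, hNum⟩
      intro a ha hex haq b hb
      refine hCl a ha (fun hf => hf) ?_ b hb
      intro hmem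
      simp only [List.map_cons, List.mem_cons] at hmem
      rcases hmem with h | h
      · exact hex h
      · exact haq (by simp [h])
    obtain ⟨M', hsub, hI', hap, hnbAll⟩ :=
      dirs_fold_inv maps c₀ V₀ base (fun a => a = (c.1.toNat, c.2.toNat)) c.1 c.2 hx hy hpop
        (v, rest, num) M hInvRest
    -- drop the exemption: the popped cell's neighbours are now all visited
    have hI'' : BfsInv maps c₀ V₀ base (fun _ => False)
        (directions.foldl (tryDir maps c.1 c.2) (v, rest, num)).1
        (directions.foldl (tryDir maps c.1 c.2) (v, rest, num)).2.1 M'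
        (directions.foldl (tryDir maps c.1 c.2) (v, rest, num)).2.2 := by
      obtain ⟨k1, k2, k3, k4, k5, k6, k7, k8, k9⟩ := hI'
      refine ⟨k1, k2, k3, k4, k5, k6, k7, ?_, k9⟩
      intro a ha _ haq b hb
      by_cases hac : a = (c.1.toNat, c.2.toNat)
      · subst hac
        exact hnbAll b hb
      · exact k8 a ha hac haq b hb
    exact ih M' hI''


-- ---------- components, seeds and the outer scan (port A) ----------

noncomputable def connB (maps : List String) (c d : Nat × Nat) : Bool :=
  @decide (Conn maps c d) (Classical.propDecidable _)

lemma connB_iff (maps : List String) (c d : Nat × Nat) : connB maps c d = true ↔ Conn maps c d :=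
  @decide_eq_true_iff _ (Classical.propDecidable _)

def Seed (maps : List String) (c : Nat × Nat) : Prop :=
  land maps c ∧ ∀ d, Conn maps c d → idxm maps c ≤ idxm maps d

noncomputable def seedB (maps : List String) (c : Nat × Nat) : Bool :=
  @decide (Seed maps c) (Classical.propDecidable _)

lemma seedB_iff (maps : List String) (c : Nat × Nat) : seedB maps c = true ↔ Seed maps c :=
  @decide_eq_true_iff _ (Classical.propDecidable _)

noncomputable def compList (maps : List String) (c : Nat × Nat) : List (Nat × Nat) :=
  (cells maps).filter (connB maps c)

noncomputable def compSum (maps : List String) (c : Nat × Nat) : Int :=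
  ((compList maps c).map (val maps)).sum

noncomputable def seeds (maps : List String) : List (Nat × Nat) :=
  (cells maps).filter (seedB maps)

lemma cell_of_land (maps : List String) {c : Nat × Nat} (h : land maps c) : c ∈ cells maps :=
  mem_cellsG.2 ⟨h.1, h.2.1⟩

lemma pairwise_cells (maps : List String) :
    (cells maps).Pairwise (fun a b => idxm maps a < idxm maps b) :=
  pairwise_cellsG maps.length (Wof maps)

def ScanInv (maps : List String) (P : List (Nat × Nat)) (st : List (List Bool) × List Int) :
    Prop :=
  Rect maps st.1 ∧ (∀ c, Vm st.1 c ↔ ∃ p ∈ P, Conn maps p c) ∧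
  st.2 = (P.filter (seedB maps)).map (compSum maps)

lemma scan_step (maps : List String) (P rest : List (Nat × Nat)) (t : Nat × Nat)
    (st : List (List Bool) × List Int) (hcells : cells maps = P ++ t :: rest)
    (hInv : ScanInv maps P st) : ScanInv maps (P ++ [t]) (scanCell maps st t.1 t.2) := by
  obtain ⟨hRect, hVm, hAns⟩ := hInv
  have hPchar := prefix_char (idxm maps) (pairwise_cells maps) hcells
  have htmem : t ∈ cells maps := by rw [hcells]; simp
  have htb : t.1 < maps.length ∧ t.2 < Wof maps := mem_cellsG.1 htmem
  unfold scanCell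
  split_ifs with hcond
  · obtain ⟨hv, hX⟩ := hcond
    have hlandt : land maps t := ⟨htb.1, htb.2, hX⟩
    have hnVm : ¬ Vm st.1 t := by simp [Vm, hv]
    have hseed : Seed maps t := by
      refine ⟨hlandt, ?_⟩
      intro d hconn
      by_contra hlt
      apply hnVm
      apply (hVm t).2
      refine ⟨d, ?_, conn_symm maps hconn⟩
      exact (hPchar d).2 ⟨cell_of_land maps (land_of_conn maps hconn), by omega⟩
    have hnV₀ : ¬ ∃ p ∈ P, Conn maps p t := fun hex => hnVm ((hVm t).2 hex)
    have hbl : t.1 < st.1.length := by rw [hRect.1]; exact htb.1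
    have hrow : (st.1.getD t.1 []).length = Wof maps :=
      hRect.2 _ (by rw [List.getD_eq_getElem _ _ hbl]; exact List.getElem_mem hbl)
    have hVmset : ∀ a b, vget (vset st.1 t.1 t.2) a b =
        if a = t.1 ∧ b = t.2 then true else vget st.1 a b :=
      fun a b => vget_vset st.1 t.1 t.2 a b hbl (by rw [hrow]; exact htb.2)
    have hBfs := bfs_post maps t (fun c => ∃ p ∈ P, Conn maps p c) 0
      (fun a b ⟨p, hp, hpa⟩ hab => ⟨p, hp, conn_tail maps hpa hab⟩)
      (vset st.1 t.1 t.2) [((t.1 : Int), (t.2 : Int))] (digitVal (charAt maps t.1 t.2)) [t]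
      (by
        refine ⟨rect_vset maps _ _ _ hRect, by simp, by simp, ?_, ?_, ?_, ?_, ?_, ?_⟩
        · intro c
          simp only [Vm, hVmset c.1 c.2, List.mem_singleton]
          split_ifs with hc
          · have hceq : c = t := Prod.ext hc.1 hc.2
            simp [hceq]
          · rw [show (vget st.1 c.1 c.2 = true ↔ ∃ p ∈ P, Conn maps p c) from hVm c]
            constructor
            · intro h; exact Or.inl h
            · rintro (h | hceq)
              · exact h
              · exact absurd (Prod.ext_iff.1 hceq) (by tauto)
        · intro c hc
          rw [List.mem_singleton] at hc; subst hc; exact hnV₀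
        · intro c hc
          rw [List.mem_singleton] at hc; subst hc; exact conn_refl maps hlandt
        · intro p hp
          rw [List.mem_singleton] at hp; subst hp
          exact ⟨by omega, by omega, by simp⟩
        · intro c hc _ hcq
          exfalso
          rw [List.mem_singleton] at hc; subst hc
          exact hcq (by simp)
        · simp [val])
    obtain ⟨hRect', hVm', M', hNd', hM', hNum'⟩ := hBfs
    refine ⟨hRect', ?_, ?_⟩
    · intro c
      rw [hVm' c]
      constructor
      · rintro (⟨p, hp, hpc⟩ | h)
        · exact ⟨p, by simp [hp], hpc⟩
        · exact ⟨t, by simp, h⟩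
      · rintro ⟨p, hp, hpc⟩
        rcases List.mem_append.1 hp with h | h
        · exact Or.inl ⟨p, h, hpc⟩
        · rw [List.mem_singleton] at h; subst h; exact Or.inr hpc
    · simp only [List.filter_append, List.map_append, hAns]
      congr 1
      have hst : seedB maps t = true := (seedB_iff maps t).2 hseed
      simp only [List.filter_singleton, hst, cond_true, List.map_cons, List.map_nil]
      congr 1
      rw [hNum']
      have hperm : M'.Perm (compList maps t) := by
        rw [List.perm_ext_iff_of_nodup hNd'
          (by unfold compList cells; exact List.Nodup.filter _ (nodup_cellsG _ _))]
        intro a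
        rw [hM' a]
        unfold compList
        rw [List.mem_filter]
        constructor
        · intro h
          exact ⟨cell_of_land maps (land_of_conn maps h), (connB_iff maps t a).2 h⟩
        · rintro ⟨-, h⟩
          exact (connB_iff maps t a).1 h
      rw [compSum, ← List.Perm.sum_eq (hperm.map (val maps))]
      ring
  · rw [not_and_or] at hcond
    have hVmt : ∀ c, (∃ p ∈ P ++ [t], Conn maps p c) ↔ ∃ p ∈ P, Conn maps p c := by
      intro c
      constructor
      · rintro ⟨p, hp, hpc⟩
        rcases List.mem_append.1 hp with h | h
        · exact ⟨p, h, hpc⟩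
        · rw [List.mem_singleton] at h
          subst h
          rcases hcond with h | h
          · have hvt : Vm st.1 p := by
              unfold Vm
              revert h
              cases vget st.1 p.1 p.2 <;> simp
            obtain ⟨p', hp', hpp'⟩ := (hVm p).1 hvt
            exact ⟨p', hp', conn_trans maps hpp' hpc⟩
          · exfalso
            rw [not_not] at h
            exact hpc.1.2.2 h
      · rintro ⟨p, hp, hpc⟩
        exact ⟨p, by simp [hp], hpc⟩
    have hseedf : seedB maps t = false := by
      rw [Bool.eq_false_iff]
      intro hs
      obtain ⟨hlandt, hmin⟩ := (seedB_iff maps t).1 hs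
      rcases hcond with h | h
      · have hvt : Vm st.1 t := by
          unfold Vm
          revert h
          cases vget st.1 t.1 t.2 <;> simp
        obtain ⟨p, hp, hpt⟩ := (hVm t).1 hvt
        have hpP := (hPchar p).1 hp
        exact absurd (hmin p (conn_symm maps hpt)) (by omega)
      · rw [not_not] at h
        exact hlandt.2.2 h
    refine ⟨hRect, fun c => by rw [hVm c, hVmt c], ?_⟩
    rw [List.filter_append, List.filter_singleton]
    simp [hseedf, hAns]

lemma scan_fold (maps : List String) :
    ∀ (suffix P : List (Nat × Nat)) (st : List (List Bool) × List Int),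
      cells maps = P ++ suffix → ScanInv maps P st →
      ScanInv maps (cells maps)
        (suffix.foldl (fun st c => scanCell maps st c.1 c.2) st) := by
  intro suffix
  induction suffix with
  | nil =>
    intro P st hcells hInv
    rw [List.append_nil] at hcells
    rw [← hcells] at hInv
    simpa using hInv
  | cons t rest ih =>
    intro P st hcells hInv
    have hstep := scan_step maps P rest t st hcells hInv
    have : cells maps = (P ++ [t]) ++ rest := by rw [hcells]; simp
    simpa using ih (P ++ [t]) _ this hstep


lemma solutionA_char (maps : List String) :
    solution maps =
      if (seeds maps).map (compSum maps) = [] then [-1]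
      else PySem.List.sorted ((seeds maps).map (compSum maps)) (fun x => x) false := by
  unfold solution
  dsimp only
  rw [doubleFoldl maps.length (Wof maps) (fun st i j => scanCell maps st i j)]
  have hInv0 : ScanInv maps []
      (List.replicate maps.length (List.replicate (Wof maps) false), ([] : List Int)) := by
    refine ⟨rect_replicate maps, ?_, by simp⟩
    intro c
    simp [Vm, vget_replicate]
  have hfin := scan_fold maps (cells maps) [] _ (by simp) hInv0
  obtain ⟨-, -, hans⟩ := hfin
  unfold cells at hans
  rw [hans]
  rfl


-- ---------- label-relaxation analysis (port B) ----------

noncomputable def landB (maps : List String) (c : Nat × Nat) : Bool :=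
  @decide (land maps c) (Classical.propDecidable _)

lemma landB_iff (maps : List String) (c : Nat × Nat) : landB maps c = true ↔ land maps c :=
  @decide_eq_true_iff _ (Classical.propDecidable _)

def GoodL (maps : List String) (L : List (Option Nat)) : Prop :=
  L.length = maps.length * Wof maps ∧
  ∀ c : Nat × Nat, c.1 < maps.length → c.2 < Wof maps →
    ((¬ land maps c → L.getD (idxm maps c) none = none) ∧
     (land maps c → ∃ d, Conn maps c d ∧ L.getD (idxm maps c) none = some (idxm maps d) ∧
        idxm maps d ≤ idxm maps c))

lemma goodL_init (maps : List String) :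
    GoodL maps (grid2 maps.length (Wof maps)
      (fun i j => if charAt maps i j = 'X' then none else some (i * Wof maps + j))) := by
  refine ⟨grid2_length _ _ _, ?_⟩
  intro c h1 h2
  have hg : (grid2 maps.length (Wof maps)
      (fun i j => if charAt maps i j = 'X' then none
        else some (i * Wof maps + j))).getD (idxm maps c) none =
      (if charAt maps c.1 c.2 = 'X' then none else some (c.1 * Wof maps + c.2)) :=
    grid2_getD _ _ _ c.1 c.2 h1 h2
  constructor
  · intro hnl
    rw [hg, if_pos]
    by_contra hne
    exact hnl ⟨h1, h2, hne⟩
  · intro hl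
    exact ⟨c, conn_refl maps hl, by rw [hg, if_neg hl.2.2]; rfl, le_refl _⟩

lemma nbr_index (maps : List String) {p : Int × Int}
    (_hb : 0 ≤ p.1 ∧ p.1 < (maps.length : Int) ∧ 0 ≤ p.2 ∧ p.2 < ((Wof maps) : Int)) :
    p.1.toNat * Wof maps + p.2.toNat = idxm maps (p.1.toNat, p.2.toNat) := rfl

lemma goodL_relax (maps : List String) (L : List (Option Nat)) (hG : GoodL maps L) :
    GoodL maps (relax maps.length (Wof maps) L) := by
  obtain ⟨hlen, hent⟩ := hG
  refine ⟨by rw [relax, grid2_length], ?_⟩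
  intro c h1 h2
  have hrel : (relax maps.length (Wof maps) L).getD (idxm maps c) none =
      newLabel maps.length (Wof maps) L c.1 c.2 :=
    grid2_getD _ _ _ c.1 c.2 h1 h2
  obtain ⟨hnone, hsome⟩ := hent c h1 h2
  constructor
  · intro hnl
    rw [hrel]
    unfold newLabel
    rw [show c.1 * Wof maps + c.2 = idxm maps c from rfl, hnone hnl]
  · intro hl
    obtain ⟨d0, hconn0, hentry, hle0⟩ := hsome hl
    rw [hrel]
    unfold newLabel
    rw [show c.1 * Wof maps + c.2 = idxm maps c from rfl, hentry]
    have hP : ∀ (l : List (Int × Int)),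
        (∀ p ∈ l, (p.1 = (c.1 : Int) - 1 ∧ p.2 = (c.2 : Int)) ∨
          (p.1 = (c.1 : Int) + 1 ∧ p.2 = (c.2 : Int)) ∨
          (p.1 = (c.1 : Int) ∧ p.2 = (c.2 : Int) - 1) ∨
          (p.1 = (c.1 : Int) ∧ p.2 = (c.2 : Int) + 1)) →
        ∀ b, (∃ e, Conn maps c e ∧ b = idxm maps e ∧ b ≤ idxm maps c) →
        (∃ e, Conn maps c e ∧ l.foldl (nstep maps.length (Wof maps) L) b = idxm maps e ∧
          l.foldl (nstep maps.length (Wof maps) L) b ≤ idxm maps c) := by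
      intro l
      induction l with
      | nil => intro _ b hb; simpa using hb
      | cons p t iht =>
        intro hmem b hb
        simp only [List.foldl_cons]
        apply iht (fun p hp => hmem p (by simp [hp]))
        unfold nstep
        split_ifs with hbnd
        · cases hLn : L.getD (p.1.toNat * Wof maps + p.2.toNat) none with
          | none => exact hb
          | some m =>
            dsimp only
            split_ifs with hm
            · -- m is the label of a live neighbour: produce its witness
              have hnb1 : p.1.toNat < maps.length := by omega
              have hnb2 : p.2.toNat < Wof maps := by omega
              obtain ⟨hnn, hns⟩ := hent (p.1.toNat, p.2.toNat) hnb1 hnb2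
              rw [nbr_index maps hbnd] at hLn
              have hlnb : land maps (p.1.toNat, p.2.toNat) := by
                by_contra hno
                rw [hnn hno] at hLn
                exact absurd hLn (by simp)
              obtain ⟨e, hce, hee, hel⟩ := hns hlnb
              rw [hLn] at hee
              have hme : m = idxm maps e := by
                have := Option.some.inj hee
                omega
              have hadj : adjc maps c ((p.1.toNat, p.2.toNat)) := by
                refine ⟨hl, hlnb, ?_⟩
                rcases hmem p (by simp) with ⟨e1, e2⟩ | ⟨e1, e2⟩ | ⟨e1, e2⟩ | ⟨e1, e2⟩ <;>
                  simp only <;> omega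
              obtain ⟨e0, hconn0', heq0, hle0'⟩ := hb
              exact ⟨e, conn_trans maps (conn_tail maps (conn_refl maps hl) hadj)
                ⟨hlnb, hce.2⟩, hme, by omega⟩
            · exact hb
        · exact hb
    have := hP [((c.1:Int) - 1, (c.2:Int)), ((c.1:Int) + 1, (c.2:Int)),
        ((c.1:Int), (c.2:Int) - 1), ((c.1:Int), (c.2:Int) + 1)] (by
        intro p hp
        simp only [List.mem_cons, List.not_mem_nil, or_false] at hp
        rcases hp with rfl | rfl | rfl | rfl <;> tauto)
      (idxm maps d0) ⟨d0, hconn0, rfl, hle0⟩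
    obtain ⟨e, he1, he2, he3⟩ := this
    refine ⟨e, he1, by dsimp only; rw [he2], by omega⟩


lemma propagate_spec (maps : List String) :
    ∀ (L : List (Option Nat)) (hL : L.length = maps.length * Wof maps), GoodL maps L →
      GoodL maps (propagate maps.length (Wof maps) L hL) ∧
      relax maps.length (Wof maps) (propagate maps.length (Wof maps) L hL) =
        propagate maps.length (Wof maps) L hL := by
  intro L hL
  fun_induction propagate maps.length (Wof maps) L hL with
  | case1 L hL hfix =>
    intro hG
    exact ⟨hG, hfix⟩
  | case2 L hL hfix ih =>
    intro hG
    exact ih (goodL_relax maps L hG)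

noncomputable def labval (maps : List String) (L : List (Option Nat)) (c : Nat × Nat) : Nat :=
  (L.getD (idxm maps c) none).getD 0

lemma labval_entry (maps : List String) (L : List (Option Nat)) (hG : GoodL maps L)
    {c : Nat × Nat} (hl : land maps c) :
    L.getD (idxm maps c) none = some (labval maps L c) := by
  obtain ⟨d, -, he, -⟩ := (hG.2 c hl.1 hl.2.1).2 hl
  unfold labval
  rw [he]
  simp

lemma labval_witness (maps : List String) (L : List (Option Nat)) (hG : GoodL maps L)
    {c : Nat × Nat} (hl : land maps c) :
    ∃ d, Conn maps c d ∧ labval maps L c = idxm maps d ∧ idxm maps d ≤ idxm maps c := by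
  obtain ⟨d, hc, he, hle⟩ := (hG.2 c hl.1 hl.2.1).2 hl
  exact ⟨d, hc, by unfold labval; rw [he]; simp, hle⟩

lemma foldl_nstep_le (h w : Nat) (L : List (Option Nat)) :
    ∀ (l : List (Int × Int)) (b : Nat) (p : Int × Int), p ∈ l →
      (0 ≤ p.1 ∧ p.1 < (h:Int) ∧ 0 ≤ p.2 ∧ p.2 < (w:Int)) →
      ∀ m, L.getD (p.1.toNat * w + p.2.toNat) none = some m →
      l.foldl (nstep h w L) b ≤ m := by
  have hdec : ∀ (b : Nat) (x : Int × Int), nstep h w L b x ≤ b := by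
    intro b x
    unfold nstep
    split_ifs with hb
    · cases hL : L.getD (x.1.toNat * w + x.2.toNat) none with
      | none => simp
      | some m => dsimp only; split_ifs with hm <;> omega
    · exact le_refl _
  intro l
  induction l with
  | nil => intro b p hp; simp at hp
  | cons x t ih =>
    intro b p hp hbnd m hm
    rcases List.mem_cons.1 hp with rfl | hp'
    · calc (p :: t).foldl (nstep h w L) b = t.foldl (nstep h w L) (nstep h w L b p) := by
            simp
        _ ≤ nstep h w L b p := foldl_le_init _ hdec t _
        _ ≤ m := by
            unfold nstep
            rw [if_pos hbnd, hm]
            dsimp only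
            split_ifs with hlt <;> omega
    · simp only [List.foldl_cons]
      exact ih _ p hp' hbnd m hm

lemma fix_le (maps : List String) (L : List (Option Nat)) (hG : GoodL maps L)
    (hfix : relax maps.length (Wof maps) L = L) {c b : Nat × Nat}
    (hadj : adjc maps c b) : labval maps L c ≤ labval maps L b := by
  obtain ⟨hlc, hlb, hco⟩ := hadj
  have hrel : (relax maps.length (Wof maps) L).getD (idxm maps c) none =
      newLabel maps.length (Wof maps) L c.1 c.2 :=
    grid2_getD _ _ _ c.1 c.2 hlc.1 hlc.2.1
  rw [hfix] at hrel
  rw [labval_entry maps L hG hlc] at hrel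
  unfold newLabel at hrel
  rw [show c.1 * Wof maps + c.2 = idxm maps c from rfl,
    labval_entry maps L hG hlc] at hrel
  dsimp only at hrel
  have hfold := Option.some.inj hrel
  -- the neighbour b appears among the four candidates, so the fold is ≤ its label
  have hbnd : ∃ p ∈ [((c.1:Int) - 1, (c.2:Int)), ((c.1:Int) + 1, (c.2:Int)),
      ((c.1:Int), (c.2:Int) - 1), ((c.1:Int), (c.2:Int) + 1)],
      (0 ≤ p.1 ∧ p.1 < (maps.length : Int) ∧ 0 ≤ p.2 ∧ p.2 < ((Wof maps) : Int)) ∧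
      p.1.toNat = b.1 ∧ p.2.toNat = b.2 := by
    have hc1 := hlc.1
    have hc2 := hlc.2.1
    have hb1 := hlb.1
    have hb2 := hlb.2.1
    rcases hco with ⟨h1, h2 | h2⟩ | ⟨h1, h2 | h2⟩
    · exact ⟨((c.1:Int), (c.2:Int) + 1), by simp,
        ⟨by omega, by omega, by omega, by omega⟩, by omega, by omega⟩
    · exact ⟨((c.1:Int), (c.2:Int) - 1), by simp,
        ⟨by omega, by omega, by omega, by omega⟩, by omega, by omega⟩
    · exact ⟨((c.1:Int) + 1, (c.2:Int)), by simp,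
        ⟨by omega, by omega, by omega, by omega⟩, by omega, by omega⟩
    · exact ⟨((c.1:Int) - 1, (c.2:Int)), by simp,
        ⟨by omega, by omega, by omega, by omega⟩, by omega, by omega⟩
  obtain ⟨p, hpmem, hpbnd, hp1, hp2⟩ := hbnd
  have hindex : p.1.toNat * Wof maps + p.2.toNat = idxm maps b := by
    rw [hp1, hp2]; rfl
  have hentb : L.getD (p.1.toNat * Wof maps + p.2.toNat) none = some (labval maps L b) := by
    rw [hindex]
    exact labval_entry maps L hG hlb
  have := foldl_nstep_le maps.length (Wof maps) L _ (labval maps L c) p hpmem hpbnd _ hentb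
  omega

lemma labval_const (maps : List String) (L : List (Option Nat)) (hG : GoodL maps L)
    (hfix : relax maps.length (Wof maps) L = L) {c d : Nat × Nat}
    (hconn : Conn maps c d) : labval maps L c = labval maps L d := by
  obtain ⟨hl, hr⟩ := hconn
  induction hr with
  | refl => rfl
  | tail hcd hstep ih =>
    rw [ih]
    exact Nat.le_antisymm (fix_le maps L hG hfix hstep)
      (fix_le maps L hG hfix (adjc_symm maps hstep))

lemma labval_eq_iff (maps : List String) (L : List (Option Nat)) (hG : GoodL maps L)
    (hfix : relax maps.length (Wof maps) L = L) {c d : Nat × Nat}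
    (hlc : land maps c) (hld : land maps d) :
    labval maps L c = labval maps L d ↔ Conn maps c d := by
  constructor
  · intro heq
    obtain ⟨e, hce, hle, -⟩ := labval_witness maps L hG hlc
    obtain ⟨e', hde, hle', -⟩ := labval_witness maps L hG hld
    have hee : e = e' := by
      apply idxm_inj maps (land_of_conn maps hce).2.1 (land_of_conn maps hde).2.1
      omega
    subst hee
    exact conn_trans maps hce (conn_symm maps hde)
  · exact labval_const maps L hG hfix

lemma exists_seed_of_land (maps : List String) (L : List (Option Nat)) (hG : GoodL maps L)
    (hfix : relax maps.length (Wof maps) L = L) {c : Nat × Nat} (hl : land maps c) :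
    ∃ s, Seed maps s ∧ Conn maps c s ∧ labval maps L c = idxm maps s := by
  obtain ⟨d, hcd, hle, -⟩ := labval_witness maps L hG hl
  refine ⟨d, ⟨land_of_conn maps hcd, ?_⟩, hcd, hle⟩
  intro e hde
  have hce : Conn maps c e := conn_trans maps hcd hde
  obtain ⟨f, hef, hlef, hleef⟩ := labval_witness maps L hG (land_of_conn maps hce)
  have h1 : labval maps L e = labval maps L c := labval_const maps L hG hfix (conn_symm maps hce)
  omega

lemma seed_labval (maps : List String) (L : List (Option Nat)) (hG : GoodL maps L)
    {s : Nat × Nat} (hs : Seed maps s) : labval maps L s = idxm maps s := by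
  obtain ⟨d, hsd, hle, hled⟩ := labval_witness maps L hG hs.1
  have := hs.2 d hsd
  omega


-- ---------- grouping the labels into the sums dict (port B) ----------

lemma getD_foldl_insert_add {α : Type} (key : α → Nat) (f : α → Int) :
    ∀ (l : List α) (d : PySem.Dict Nat Int) (v : Nat),
      (l.foldl (fun d x => d.insert (key x) (d.getD (key x) 0 + f x)) d).getD v 0 =
        d.getD v 0 + ((l.filter (fun x => key x == v)).map f).sum := by
  intro l
  induction l with
  | nil => intro d v; simp
  | cons x t ih =>
    intro d v
    simp only [List.foldl_cons]
    rw [ih]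
    by_cases hx : key x = v
    · rw [List.filter_cons_of_pos (by simpa using hx)]
      rw [PySem.Dict.getD_insert]
      rw [if_pos hx.symm, hx]
      simp only [List.map_cons, List.sum_cons]
      ring
    · rw [List.filter_cons_of_neg (by simpa using hx)]
      rw [PySem.Dict.getD_insert, if_neg (fun hv => hx hv.symm)]

lemma seeds_eq_filter_land (maps : List String) :
    ((cells maps).filter (landB maps)).filter (seedB maps) = seeds maps := by
  rw [List.filter_filter]
  apply List.filter_congr
  intro c _
  rcases Bool.eq_false_or_eq_true (seedB maps c) with hs | hs
  · have : landB maps c = true := (landB_iff maps c).2 ((seedB_iff maps c).1 hs).1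
    simp [hs, this]
  · simp [hs]

lemma ofList_labels (maps : List String) (L : List (Option Nat)) (hG : GoodL maps L)
    (hfix : relax maps.length (Wof maps) L = L) :
    ∀ (suffix Q : List (Nat × Nat)) (acc : PySem.Set Nat),
      (cells maps).filter (landB maps) = Q ++ suffix →
      acc = (Q.filter (seedB maps)).map (labval maps L) →
      suffix.foldl (fun s c => PySem.Set.add s (labval maps L c)) acc =
        ((Q ++ suffix).filter (seedB maps)).map (labval maps L) := by
  intro suffix
  induction suffix with
  | nil =>
    intro Q acc h1 h2
    simpa using h2
  | cons t rest ih =>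
    intro Q acc h1 h2
    have hpwL : ((cells maps).filter (landB maps)).Pairwise
        (fun a b => idxm maps a < idxm maps b) :=
      List.Pairwise.filter _ (pairwise_cells maps)
    have hQchar := prefix_char (idxm maps) hpwL h1
    have htmem : t ∈ (cells maps).filter (landB maps) := by rw [h1]; simp
    have hlt : land maps t := (landB_iff maps t).1 (List.mem_filter.1 htmem).2
    have hacc_iff : labval maps L t ∈ acc ↔ ¬ Seed maps t := by
      rw [h2]
      constructor
      · intro hmem hseedt
        obtain ⟨q, hq, hlabq⟩ := List.mem_map.1 hmem
        have hqQ := List.mem_filter.1 hq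
        have hseedq := (seedB_iff maps q).1 hqQ.2
        have hconn : Conn maps q t :=
          (labval_eq_iff maps L hG hfix hseedq.1 hlt).1 hlabq
        have hqlt : idxm maps q < idxm maps t := ((hQchar q).1 hqQ.1).2
        have := hseedt.2 q (conn_symm maps hconn)
        omega
      · intro hns
        obtain ⟨s, hseeds, hconn, hlab⟩ := exists_seed_of_land maps L hG hfix hlt
        have hst : s ≠ t := fun he => hns (he ▸ hseeds)
        have hlts : idxm maps s < idxm maps t := by
          have h1' := hseeds.2 t (conn_symm maps hconn)
          rcases Nat.lt_or_ge (idxm maps s) (idxm maps t) with h | h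
          · exact h
          · exfalso
            exact hst (idxm_inj maps hseeds.1.2.1 hlt.2.1 (by omega))
        have hsmem : s ∈ Q := (hQchar s).2
          ⟨List.mem_filter.2 ⟨cell_of_land maps hseeds.1, (landB_iff maps s).2 hseeds.1⟩, hlts⟩
        refine List.mem_map.2 ⟨s, List.mem_filter.2 ⟨hsmem, (seedB_iff maps s).2 hseeds⟩, ?_⟩
        rw [seed_labval maps L hG hseeds, hlab]
    simp only [List.foldl_cons]
    have hstep : PySem.Set.add acc (labval maps L t) =
        ((Q ++ [t]).filter (seedB maps)).map (labval maps L) := by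
      rw [PySem.Set.add_eq_ite]
      split_ifs with hmem
      · have hns : ¬ Seed maps t := hacc_iff.1 hmem
        rw [List.filter_append, List.filter_singleton,
          (by simp [Bool.eq_false_iff, seedB_iff]; exact hns : seedB maps t = false)]
        simpa using h2
      · have hseedt : Seed maps t := by
          by_contra hns
          exact hmem (hacc_iff.2 hns)
        rw [List.filter_append, List.filter_singleton,
          (seedB_iff maps t).2 hseedt]
        simp only [cond_true, List.map_append, List.map_cons, List.map_nil]
        rw [h2]
      -- (the bif/cond normalisation is handled by simp in both branches)
    have := ih (Q ++ [t]) _ (by rw [h1]; simp) hstep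
    rw [this]
    simp

lemma values_eq (maps : List String) (L : List (Option Nat)) (hG : GoodL maps L)
    (hfix : relax maps.length (Wof maps) L = L) :
    (((cells maps).filter (landB maps)).foldl
        (fun d c => d.insert (labval maps L c) (d.getD (labval maps L c) 0 + val maps c))
        (PySem.Dict.empty : PySem.Dict Nat Int)).values =
      (seeds maps).map (compSum maps) := by
  set LL := (cells maps).filter (landB maps) with hLL
  set D := LL.foldl
      (fun d c => d.insert (labval maps L c) (d.getD (labval maps L c) 0 + val maps c))
      (PySem.Dict.empty : PySem.Dict Nat Int) with hD
  have hkeys : D.keys = (seeds maps).map (labval maps L) := by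
    rw [hD, PySem.Dict.keys_foldl_insert_key]
    rw [show (PySem.Dict.empty : PySem.Dict Nat Int).keys = [] from rfl]
    rw [PySem.Set.update_nil_left]
    rw [PySem.Set.ofList_eq_foldl, List.foldl_map]
    rw [ofList_labels maps L hG hfix LL [] [] rfl (by simp)]
    rw [show ([] : List (Nat × Nat)) ++ LL = LL from by simp, hLL, seeds_eq_filter_land]
  have hnd : D.keys.Nodup := by
    rw [hD]
    exact PySem.Dict.nodup_keys_foldl_insert_key _ _ _ _ (by simp [PySem.Dict.empty])
  have hvals : D.values = D.keys.map (fun k => D.getD k 0) :=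
    PySem.Dict.values_eq_map_keys D hnd 0
  rw [hvals, hkeys, List.map_map]
  apply List.map_congr_left
  intro s hs
  have hseeds : Seed maps s := (seedB_iff maps s).1 (List.mem_filter.1 hs).2
  simp only [Function.comp_apply]
  rw [hD, getD_foldl_insert_add (fun c => labval maps L c) (val maps) LL _ _]
  rw [show (PySem.Dict.empty : PySem.Dict Nat Int).getD (labval maps L s) 0 = 0 from rfl]
  have hfilt : LL.filter (fun c => labval maps L c == labval maps L s) = compList maps s := by
    rw [hLL, List.filter_filter]
    apply List.filter_congr
    intro c _
    rcases Bool.eq_false_or_eq_true (landB maps c) with hlc | hlc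
    · have hlandc := (landB_iff maps c).1 hlc
      rcases Bool.eq_false_or_eq_true (connB maps s c) with hcb | hcb
      · have hconn := (connB_iff maps s c).1 hcb
        have : labval maps L c = labval maps L s :=
          (labval_eq_iff maps L hG hfix hlandc hseeds.1).2 (conn_symm maps hconn)
        simp [hlc, hcb, this]
      · have : ¬ (labval maps L c = labval maps L s) := by
          intro he
          have hconn := (labval_eq_iff maps L hG hfix hlandc hseeds.1).1 he
          rw [(by rw [connB_iff]; exact conn_symm maps hconn : connB maps s c = true)] at hcb
          exact Bool.noConfusion hcb
        simp [hlc, hcb, this]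
    · have : connB maps s c = false := by
        rw [Bool.eq_false_iff]
        intro hcb
        have hlnd := land_of_conn maps ((connB_iff maps s c).1 hcb)
        rw [(landB_iff maps c).2 hlnd] at hlc
        exact Bool.noConfusion hlc
      simp [hlc, this]
  rw [hfilt]
  rw [compSum]
  ring


lemma sums_values (maps : List String) (L : List (Option Nat)) (hG : GoodL maps L)
    (hfix : relax maps.length (Wof maps) L = L) :
    ((List.range maps.length).foldl (fun d i =>
        (List.range (Wof maps)).foldl (fun d j => sumStep maps L (Wof maps) d i j) d)
      (PySem.Dict.empty : PySem.Dict Nat Int)).values = (seeds maps).map (compSum maps) := by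
  rw [doubleFoldl maps.length (Wof maps) (sumStep maps L (Wof maps))]
  have hcongr : ∀ (d : PySem.Dict Nat Int) (c : Nat × Nat),
      c ∈ cellsG maps.length (Wof maps) →
      sumStep maps L (Wof maps) d c.1 c.2 =
      (if landB maps c then
        d.insert (labval maps L c) (d.getD (labval maps L c) 0 + val maps c) else d) := by
    intro d c hc
    obtain ⟨h1, h2⟩ := mem_cellsG.1 hc
    unfold sumStep
    by_cases hl : land maps c
    · rw [show c.1 * Wof maps + c.2 = idxm maps c from rfl, labval_entry maps L hG hl,
        if_pos ((landB_iff maps c).2 hl)]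
      rfl
    · rw [show c.1 * Wof maps + c.2 = idxm maps c from rfl, (hG.2 c h1 h2).1 hl,
        if_neg (by rw [landB_iff]; exact hl)]
  rw [PySem.List.foldl_congr_mem _ _ _ _ hcongr]
  rw [PySem.List.foldl_if_eq_foldl_filter]
  exact values_eq maps L hG hfix

lemma solutionB_char (maps : List String) :
    solution_alt maps =
      if (seeds maps).map (compSum maps) = [] then [-1]
      else PySem.List.sorted ((seeds maps).map (compSum maps)) (fun x => x) false := by
  unfold solution_alt
  dsimp only
  obtain ⟨hG, hfix⟩ := propagate_spec maps
    (grid2 maps.length (Wof maps)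
      (fun i j => if charAt maps i j = 'X' then none else some (i * Wof maps + j)))
    (grid2_length maps.length (Wof maps) _) (goodL_init maps)
  rw [sums_values maps _ hG hfix]

-- ===== VERDICT (by name: the statement is the Claim_ definition above) =====
theorem solution_spec : Claim_equal_solution := by
  unfold Claim_equal_solution Spec_solution
  intro maps _ _
  rw [solutionA_char maps, solutionB_char maps]
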